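-- pv_equiv track=rewrite | github.com/yuyukiin/faculdade-cc | Linguagens Formais e Autômatos/trabalho/parteB.py | afd_exatamente_tres_uns
-- ===== SOURCE A (Python) =====
-- def afd_exatamente_tres_uns(palavra):
--     estado = 'q0'
--     for simbolo in palavra:
--         if estado == 'q0':
--             if simbolo == '1':
--                 estado = 'q1'
--             elif simbolo == '0':
--                 estado = 'q0'
--             else:
--                 return False
--         elif estado == 'q1':
--             if simbolo == '1':
--                 estado = 'q2'
--             elif simbolo == '0':
--                 estado = 'q1'
--             else:
--                 return False
--         elif estado == 'q2':
--             if simbolo == '1':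
--                 estado = 'q3'
--             elif simbolo == '0':
--                 estado = 'q2'
--             else:
--                 return False
--         elif estado == 'q3':
--             if simbolo == '1':
--                 return False
--             elif simbolo == '0':
--                 estado = 'q3'
--             else:
--                 return False
--     return estado == 'q3'
-- ===== SOURCE B (Python) =====
-- def afd_exatamente_tres_uns(palavra):
--     return all(c in '01' for c in palavra) and palavra.count('1') == 3
-- ===== Notes on version B (the rewrite author's own statement) =====
-- stated objective: idiomatic
-- what changed: Replaces the explicit 4-state DFA simulation (state variable, per-state branching) with a one-line validate-then-count formulation: every symbol must be a binary digit and the number of one-digits must be exactly three.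
import Mathlib
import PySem

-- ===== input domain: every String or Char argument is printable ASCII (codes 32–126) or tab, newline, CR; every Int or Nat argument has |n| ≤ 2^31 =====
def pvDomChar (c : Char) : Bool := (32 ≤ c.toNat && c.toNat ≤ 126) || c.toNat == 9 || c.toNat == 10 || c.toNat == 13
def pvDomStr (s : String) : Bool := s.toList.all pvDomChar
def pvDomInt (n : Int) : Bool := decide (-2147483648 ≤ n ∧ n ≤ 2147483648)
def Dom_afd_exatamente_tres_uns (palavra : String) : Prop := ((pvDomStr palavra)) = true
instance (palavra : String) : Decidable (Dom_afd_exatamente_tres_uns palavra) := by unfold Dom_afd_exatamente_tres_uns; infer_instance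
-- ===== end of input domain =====

-- B replaces A's explicit 4-state DFA loop with a validate-alphabet-then-count-ones one-liner (idiomatic; same cost).
-- ===== PORT A =====
-- the DFA loop of A, state as the Python string, branches in A's order; the final
-- else (unreachable state string) mirrors Python's loop continuing with estado unchanged
def afdLoop (estado : String) (cs : List Char) : Bool :=
  match cs with
  | [] => estado == "q3"
  | simbolo :: rest =>
    if estado == "q0" then
      if simbolo == '1' then afdLoop "q1" rest
      else if simbolo == '0' then afdLoop "q0" rest
      else false
    else if estado == "q1" then
      if simbolo == '1' then afdLoop "q2" rest
      else if simbolo == '0' then afdLoop "q1" rest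
      else false
    else if estado == "q2" then
      if simbolo == '1' then afdLoop "q3" rest
      else if simbolo == '0' then afdLoop "q2" rest
      else false
    else if estado == "q3" then
      if simbolo == '1' then false
      else if simbolo == '0' then afdLoop "q3" rest
      else false
    else afdLoop estado rest

def afd_exatamente_tres_uns (palavra : String) : Bool :=
  afdLoop "q0" palavra.toList

-- ===== PORT B =====
def afd_exatamente_tres_uns_alt (palavra : String) : Bool :=
  (palavra.toList.all (fun c => (['0', '1'] : List Char).contains c))
    && (PySem.Str.count palavra "1" == 3)

-- ===== PRECONDITION & SPEC =====
def Spec_afd_exatamente_tres_uns (palavra : String) (out : Bool) : Prop := out = afd_exatamente_tres_uns_alt palavra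
instance (palavra : String) (out : Bool) : Decidable (Spec_afd_exatamente_tres_uns palavra out) := by unfold Spec_afd_exatamente_tres_uns; infer_instance

-- ===== CLAIM (what is proved, stated in full; the proofs are below) =====
def Claim_equal_afd_exatamente_tres_uns : Prop := ∀ (palavra : String), Dom_afd_exatamente_tres_uns palavra → Spec_afd_exatamente_tres_uns palavra (afd_exatamente_tres_uns palavra)

-- ===== LEMMAS AND PROOFS =====


-- helper spec: alphabet-valid and count-of-ones form, used to characterise both sides
def okCount (cs : List Char) (k : Nat) : Bool :=
  (cs.all (fun c => c == '0' || c == '1')) && (cs.count '1' == k)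

theorem afdLoop_eq_okCount (cs : List Char) :
    afdLoop "q0" cs = okCount cs 3 ∧ afdLoop "q1" cs = okCount cs 2 ∧
    afdLoop "q2" cs = okCount cs 1 ∧ afdLoop "q3" cs = okCount cs 0 := by
  induction cs with
  | nil => refine ⟨?_, ?_, ?_, ?_⟩ <;> simp [afdLoop, okCount]
  | cons c rest ih =>
    obtain ⟨h0, h1, h2, h3⟩ := ih
    by_cases hc1 : c = '1'
    · subst hc1
      refine ⟨?_, ?_, ?_, ?_⟩ <;>
        simp [afdLoop, okCount, h1, h2, h3]
    · by_cases hc0 : c = '0'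
      · subst hc0
        refine ⟨?_, ?_, ?_, ?_⟩ <;>
          simp [afdLoop, okCount, h0, h1, h2, h3]
      · refine ⟨?_, ?_, ?_, ?_⟩ <;>
          simp [afdLoop, okCount, hc0, hc1]

-- PySem.Chars.count with a single-character needle is List.count (fuel-indexed go unfolded)
theorem count_go_single (c : Char) (fuel : Nat) :
    ∀ (l : List Char) (acc : Nat), l.length ≤ fuel →
      PySem.Chars.count.go [c] fuel l acc = acc + l.count c := by
  induction fuel with
  | zero =>
    intro l acc h
    have : l = [] := List.eq_nil_of_length_eq_zero (Nat.le_zero.mp h)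
    subst this
    simp [PySem.Chars.count.go]
  | succ n ih =>
    intro l acc h
    cases l with
    | nil => simp [PySem.Chars.count.go]
    | cons x t =>
      have hlen : t.length ≤ n := by simpa using Nat.succ_le_succ_iff.mp h
      by_cases hx : c = x
      · subst hx
        simp [PySem.Chars.count.go, List.isPrefixOf, ih t (acc + 1) hlen]
        omega
      · have : ([c].isPrefixOf (x :: t)) = false := by
          simp [List.isPrefixOf, hx]
        simp [PySem.Chars.count.go, this, ih t acc hlen, Ne.symm hx]

theorem chars_count_single (c : Char) (l : List Char) :
    PySem.Chars.count l [c] = l.count c := by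
  simp [PySem.Chars.count, count_go_single c l.length l 0 (le_refl _)]

theorem alt_eq_okCount (palavra : String) :
    afd_exatamente_tres_uns_alt palavra = okCount palavra.toList 3 := by
  unfold afd_exatamente_tres_uns_alt okCount
  have hcnt : PySem.Str.count palavra "1" = palavra.toList.count '1' := by
    rw [PySem.Str.count_eq]
    simpa using chars_count_single '1' palavra.toList
  rw [hcnt]
  have hfun : (fun c : Char => (['0', '1'] : List Char).contains c)
      = (fun c : Char => c == '0' || c == '1') := by
    funext c
    simp [List.contains, List.elem]
    cases c == '0' <;> cases c == '1' <;> rfl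
  rw [hfun]

-- ===== VERDICT (by name: the statement is the Claim_ definition above) =====
theorem afd_exatamente_tres_uns_spec : Claim_equal_afd_exatamente_tres_uns := by
  intro palavra _
  unfold Spec_afd_exatamente_tres_uns afd_exatamente_tres_uns
  rw [alt_eq_okCount]
  exact (afdLoop_eq_okCount palavra.toList).1
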